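-- pv_equiv track=rewrite | github.com/wiltchamberian/BigTwo | algorithm.py | sort_and_transform_by_color
-- ===== SOURCE A (Python) =====
-- import copy
--
-- DIAMOND = 0
--
-- CLUB = 1
--
-- HEART = 2
--
-- SPADE = 3
--
-- ranks = ['3', '4', '5', '6', '7', '8', '9', 'T', 'J', 'Q', 'K', 'A', '2']
--
-- suits = ['D', 'C', 'H', 'S']
--
-- def get_rank(a):
--   return a//4
--
-- def get_suit(a):
--   return a%4
--
-- def transform_out(cards):
--   output = []
--   for i in range(len(cards)):
--     card = cards[i]
--     rank = get_rank(card)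
--     suit = get_suit(card)
--     output.append(f'{ranks[rank]}{suits[suit]}')
--   return output
--
-- def sort_and_transform_by_color(cards):
--   rt = copy.deepcopy(cards)
--   fours = [[],[],[],[]]
--   for card in cards:
--     if get_suit(card)== DIAMOND:
--       fours[0].append(card)
--     elif get_suit(card) == CLUB:
--       fours[1].append(card)
--     elif get_suit(card) == HEART:
--       fours[2].append(card)
--     elif get_suit(card) == SPADE:
--       fours[3].append(card)
--   js = []
--   for four in fours:
--     if(len(four)>=5):
--       js.append(transform_out(four))
--   return js
-- ===== SOURCE B (Python) =====
-- ranks = ['3', '4', '5', '6', '7', '8', '9', 'T', 'J', 'Q', 'K', 'A', '2']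
-- suits = ['D', 'C', 'H', 'S']
--
-- def sort_and_transform_by_color(cards):
--     result = []
--     for suit in range(4):
--         bucket = [c for c in cards if c % 4 == suit]
--         if len(bucket) >= 5:
--             result.append([f'{ranks[c//4]}{suits[c%4]}' for c in bucket])
--     return result
-- ===== Notes on version B (the rewrite author's own statement) =====
-- stated objective: simpler
-- what changed: Replaces A's single dispatching pass into a four-bucket table plus a separate index-loop transform_out pass with an explicit loop over the four suit codes, each building its bucket by filtering the input and transforming it inline with a comprehension; the unused deepcopy is dropped.
import Mathlib
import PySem

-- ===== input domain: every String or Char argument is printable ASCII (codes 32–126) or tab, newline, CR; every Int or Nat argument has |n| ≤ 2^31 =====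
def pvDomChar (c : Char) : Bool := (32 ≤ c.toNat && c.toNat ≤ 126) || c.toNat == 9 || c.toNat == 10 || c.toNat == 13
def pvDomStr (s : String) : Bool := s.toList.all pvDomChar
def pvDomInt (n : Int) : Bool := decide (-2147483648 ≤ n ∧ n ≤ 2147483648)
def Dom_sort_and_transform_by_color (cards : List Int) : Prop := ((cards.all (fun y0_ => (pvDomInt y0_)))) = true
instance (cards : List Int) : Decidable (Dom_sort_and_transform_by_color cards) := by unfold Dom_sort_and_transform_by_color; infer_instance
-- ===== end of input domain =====

-- B loops over the four suit codes, building each suit's bucket by filtering the input and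
-- transforming it inline, instead of A's single dispatching pass plus a separate transform pass.

-- ===== PORT A =====
-- module constants (shared by both Pythons)
def pyRanks : List String := ["3", "4", "5", "6", "7", "8", "9", "T", "J", "Q", "K", "A", "2"]
def pySuits : List String := ["D", "C", "H", "S"]

-- transform_out: index loop over range(len(cards)); pyGet? … getD is exact here since
-- Pre_ guarantees the rank index is in Python's valid (possibly negative) range.
def transform_out (cards : List Int) : List String :=
  (PySem.List.pyRange 0 cards.length 1).foldl
    (fun output i =>
      let card := PySem.List.pyGetD cards i 0
      let rank := PySem.Int.floordiv card 4
      let suit := PySem.Int.mod card 4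
      output ++ [((PySem.List.pyGet? pyRanks rank).getD "") ++ ((PySem.List.pyGet? pySuits suit).getD "")])
    []

def sort_and_transform_by_color (cards : List Int) : List (List String) :=
  let fours := cards.foldl
    (fun (f : List Int × List Int × List Int × List Int) card =>
      if PySem.Int.mod card 4 = 0 then (f.1 ++ [card], f.2.1, f.2.2.1, f.2.2.2)
      else if PySem.Int.mod card 4 = 1 then (f.1, f.2.1 ++ [card], f.2.2.1, f.2.2.2)
      else if PySem.Int.mod card 4 = 2 then (f.1, f.2.1, f.2.2.1 ++ [card], f.2.2.2)
      else if PySem.Int.mod card 4 = 3 then (f.1, f.2.1, f.2.2.1, f.2.2.2 ++ [card])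
      else f)
    ([], [], [], [])
  [fours.1, fours.2.1, fours.2.2.1, fours.2.2.2].foldl
    (fun js four => if four.length ≥ 5 then js ++ [transform_out four] else js)
    []

-- ===== PORT B =====
def card_str (c : Int) : String :=
  ((PySem.List.pyGet? pyRanks (PySem.Int.floordiv c 4)).getD "")
    ++ ((PySem.List.pyGet? pySuits (PySem.Int.mod c 4)).getD "")

def sort_and_transform_by_color_alt (cards : List Int) : List (List String) :=
  ([0, 1, 2, 3] : List Int).foldl
    (fun result suit =>
      let bucket := cards.filter (fun c => PySem.Int.mod c 4 = suit)
      if bucket.length ≥ 5 then result ++ [bucket.map card_str] else result)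
    []

-- ===== PRECONDITION & SPEC =====
-- Pre_ excludes exactly the inputs where Python A raises IndexError: a card whose rank index
-- c // 4 falls outside ranks' valid index range (i.e. c outside [-52, 51]) sitting in a suit
-- bucket of size ≥ 5, which transform_out then indexes.
def Pre_sort_and_transform_by_color (cards : List Int) : Prop :=
  ∀ c ∈ cards,
    (cards.filter (fun d => PySem.Int.mod d 4 = PySem.Int.mod c 4)).length ≥ 5 →
      (-52 ≤ c ∧ c ≤ 51)
instance (cards : List Int) : Decidable (Pre_sort_and_transform_by_color cards) := by
  unfold Pre_sort_and_transform_by_color; infer_instance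
def pvWitness_sort_and_transform_by_color : List Int := [0, 4, 8, 12, 16, 3, 7, 11, 15, 19]

def Spec_sort_and_transform_by_color (cards : List Int) (out : List (List String)) : Prop := out = sort_and_transform_by_color_alt cards
instance (cards : List Int) (out : List (List String)) : Decidable (Spec_sort_and_transform_by_color cards out) := by unfold Spec_sort_and_transform_by_color; infer_instance

-- ===== CLAIM (what is proved, stated in full; the proofs are below) =====
def Claim_equal_sort_and_transform_by_color : Prop := ∀ (cards : List Int), Dom_sort_and_transform_by_color cards → Pre_sort_and_transform_by_color cards → Spec_sort_and_transform_by_color cards (sort_and_transform_by_color cards)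

-- ===== LEMMAS AND PROOFS =====

-- transform_out is the map of card_str over the list
theorem transform_out_eq_map (xs : List Int) : transform_out xs = xs.map card_str := by
  unfold transform_out
  rw [show (xs.length : Int) = PySem.List.len xs from rfl]
  rw [PySem.List.foldl_pyRange_zero_pyGetD xs 0
    (fun output card =>
      output ++ [((PySem.List.pyGet? pyRanks (PySem.Int.floordiv card 4)).getD "")
        ++ ((PySem.List.pyGet? pySuits (PySem.Int.mod card 4)).getD "")]) []]
  rw [PySem.List.foldl_append_singleton_eq_map]
  rfl

-- the dispatching fold produces the four filtered buckets
theorem fours_eq_filters (xs : List Int) (a b c d : List Int) :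
    xs.foldl
      (fun (f : List Int × List Int × List Int × List Int) card =>
        if PySem.Int.mod card 4 = 0 then (f.1 ++ [card], f.2.1, f.2.2.1, f.2.2.2)
        else if PySem.Int.mod card 4 = 1 then (f.1, f.2.1 ++ [card], f.2.2.1, f.2.2.2)
        else if PySem.Int.mod card 4 = 2 then (f.1, f.2.1, f.2.2.1 ++ [card], f.2.2.2)
        else if PySem.Int.mod card 4 = 3 then (f.1, f.2.1, f.2.2.1, f.2.2.2 ++ [card])
        else f)
      (a, b, c, d)
    = (a ++ xs.filter (fun c => PySem.Int.mod c 4 = 0),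
       b ++ xs.filter (fun c => PySem.Int.mod c 4 = 1),
       c ++ xs.filter (fun c => PySem.Int.mod c 4 = 2),
       d ++ xs.filter (fun c => PySem.Int.mod c 4 = 3)) := by
  induction xs generalizing a b c d with
  | nil => simp
  | cons x xs ih =>
    have h0 : 0 ≤ PySem.Int.mod x 4 := PySem.Int.mod_nonneg x (by norm_num)
    have h4 : PySem.Int.mod x 4 < 4 := PySem.Int.mod_lt x (by norm_num)
    simp only [List.foldl_cons, List.filter_cons]
    interval_cases h : (PySem.Int.mod x 4) <;>
      (simp only [Int.reduceEq, decide_true, decide_false, if_true, if_false]; rw [ih]; simp)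

theorem sort_and_transform_by_color_spec : Claim_equal_sort_and_transform_by_color := by
  intro cards _ _
  unfold Spec_sort_and_transform_by_color
  unfold sort_and_transform_by_color sort_and_transform_by_color_alt
  rw [fours_eq_filters]
  simp [transform_out_eq_map]
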